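-- pv_equiv track=rewrite | github.com/WinningEdge-AI/WinningEdge | winedge/add_fold_column.py | check_fold
-- ===== SOURCE A (Python) =====
-- def check_fold(preflop_actions, flop_actions, turn_actions, river_actions):
--     """
--     This function examines the actions throughout the course of the poker game,
--     and determines if the small blind or big blind player folded
--
--     Args:
--         preflop_actions (list of str): A list of action strings during the preflop phase
--         flop_actions (list of str): A list of action strings during the flop phase
--         turn_actions (list of str): A list of action strings during the turn phase
--         river_actions (list of str): A list of actions strings during the river phase
--
--     Returns:
--         tuple of (bool, bool): A tuple containing two boolean values.
--             The first boolean indicates if the small blind (SB) player folded.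
--             The second boolean indicates if the big blind (BB) player folded
--     """
--     fold_sb = False
--     fold_bb = False
--
--     if preflop_actions is not None:
--         for index, action in enumerate(preflop_actions):
--             if action[0] == 'f':
--                 if index % 2 == 0:
--                     fold_sb = True
--                 else:
--                     fold_bb = True
--
--     if flop_actions is not None and fold_sb is False and fold_bb is False:
--         for index, action in enumerate(flop_actions):
--             if action[0] == 'f':
--                 if index % 2 == 0:
--                     fold_sb = True
--                 else:
--                     fold_bb = True
--
--     if turn_actions is not None and fold_sb is False and fold_bb is False:
--         for index, action in enumerate(turn_actions):
--             if action[0] == 'f':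
--                 if index % 2 == 0:
--                     fold_sb = True
--                 else:
--                     fold_bb = True
--
--     if river_actions is not None and fold_sb is False and fold_bb is False:
--         for index, action in enumerate(river_actions):
--             if action[0] == 'f':
--                 if index % 2 == 0:
--                     fold_sb = True
--                 else:
--                     fold_bb = True
--
--     return fold_sb, fold_bb
-- ===== SOURCE B (Python) =====
-- def _phase_folds(actions):
--     """(sb_folded, bb_folded) for one phase: fold at even index -> SB, odd -> BB."""
--     sb = any(a[0] == 'f' for i, a in enumerate(actions) if i % 2 == 0)
--     bb = any(a[0] == 'f' for i, a in enumerate(actions) if i % 2 == 1)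
--     return sb, bb
--
-- def check_fold(preflop_actions, flop_actions, turn_actions, river_actions):
--     for phase in (preflop_actions, flop_actions, turn_actions, river_actions):
--         if phase is not None:
--             sb, bb = _phase_folds(phase)
--             if sb or bb:
--                 return sb, bb
--     return False, False
-- ===== Notes on version B (the rewrite author's own statement) =====
-- stated objective: simpler
-- what changed: Replaces four copy-pasted stateful enumerate loops guarded by flag checks with a single loop over the phases that calls a helper computing (sb, bb) via two parity-filtered any() passes and returns early at the first phase containing a fold.
import Mathlib
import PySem

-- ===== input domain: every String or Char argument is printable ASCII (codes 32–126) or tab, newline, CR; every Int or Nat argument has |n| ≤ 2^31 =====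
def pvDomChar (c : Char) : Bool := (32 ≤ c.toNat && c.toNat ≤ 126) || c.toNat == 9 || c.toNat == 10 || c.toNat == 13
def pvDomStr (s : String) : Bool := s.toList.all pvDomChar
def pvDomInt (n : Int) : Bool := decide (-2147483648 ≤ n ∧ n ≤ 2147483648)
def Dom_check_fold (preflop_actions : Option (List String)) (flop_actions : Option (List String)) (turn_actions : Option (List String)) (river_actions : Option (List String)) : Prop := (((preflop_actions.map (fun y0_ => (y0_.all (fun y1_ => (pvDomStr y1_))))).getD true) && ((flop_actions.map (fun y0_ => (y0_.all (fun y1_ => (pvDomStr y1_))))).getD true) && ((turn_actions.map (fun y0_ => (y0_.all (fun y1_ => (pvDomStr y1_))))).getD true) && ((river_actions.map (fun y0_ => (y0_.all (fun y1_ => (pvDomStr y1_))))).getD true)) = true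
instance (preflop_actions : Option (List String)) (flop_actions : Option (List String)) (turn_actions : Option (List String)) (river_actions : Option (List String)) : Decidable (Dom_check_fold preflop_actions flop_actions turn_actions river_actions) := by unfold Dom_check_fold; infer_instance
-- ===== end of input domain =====

-- B replaces A's four copy-pasted flag-guarded loops by one loop over the phases with an
-- early return and a helper computing (sb, bb) per phase; objective: simpler.

-- ===== PORT A =====
-- one iteration of A's `for index, action in enumerate(...)` body over the (index, action) pair
def stepA (st : Bool × Bool) (q : Int × String) : Bool × Bool :=
  if PySem.Str.pyGet? q.2 0 == some 'f' then
    if q.1 % 2 == 0 then (true, st.2) else (st.1, true)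
  else st

def check_fold (preflop_actions : Option (List String)) (flop_actions : Option (List String)) (turn_actions : Option (List String)) (river_actions : Option (List String)) : Bool × Bool :=
  -- fold_sb = False; fold_bb = False  (kept as one pair of flags)
  let st0 : Bool × Bool := (false, false)
  let st1 := match preflop_actions with
    | none => st0
    | some xs => (PySem.List.enumerate xs).foldl stepA st0
  let st2 := match flop_actions with
    | none => st1
    | some xs => if st1.1 = false ∧ st1.2 = false then (PySem.List.enumerate xs).foldl stepA st1 else st1
  let st3 := match turn_actions with
    | none => st2
    | some xs => if st2.1 = false ∧ st2.2 = false then (PySem.List.enumerate xs).foldl stepA st2 else st2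
  let st4 := match river_actions with
    | none => st3
    | some xs => if st3.1 = false ∧ st3.2 = false then (PySem.List.enumerate xs).foldl stepA st3 else st3
  st4

-- ===== PORT B =====
-- _phase_folds: two parity-filtered any() passes over one phase
def phaseFolds (xs : List String) : Bool × Bool :=
  (((PySem.List.enumerate xs).filter (fun q => q.1 % 2 == 0)).any (fun q => PySem.Str.pyGet? q.2 0 == some 'f'),
   ((PySem.List.enumerate xs).filter (fun q => q.1 % 2 == 1)).any (fun q => PySem.Str.pyGet? q.2 0 == some 'f'))

-- the `for phase in (...)` loop with its early `return sb, bb`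
def goPhases : List (Option (List String)) → Bool × Bool
  | [] => (false, false)
  | none :: rest => goPhases rest
  | some xs :: rest =>
    let r := phaseFolds xs
    if r.1 || r.2 then r else goPhases rest

def check_fold_alt (preflop_actions : Option (List String)) (flop_actions : Option (List String)) (turn_actions : Option (List String)) (river_actions : Option (List String)) : Bool × Bool :=
  goPhases [preflop_actions, flop_actions, turn_actions, river_actions]

-- ===== PRECONDITION & SPEC =====
-- phase helpers for Pre_: no empty action string / no folding action in a phase (none counts as clean / no-fold)
def cleanPhase (o : Option (List String)) : Bool := (o.map (fun xs => xs.all (fun s => !s.isEmpty))).getD true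
def noFold (o : Option (List String)) : Bool := (o.map (fun xs => !xs.any (fun s => PySem.Str.pyGet? s 0 == some 'f'))).getD true
-- Pre_ excludes exactly the inputs on which Python A raises IndexError: an empty action string
-- ("" has no character 0) inside a phase A actually scans — preflop always, each later phase
-- only while no earlier scanned phase contained a fold.
def Pre_check_fold (preflop_actions : Option (List String)) (flop_actions : Option (List String)) (turn_actions : Option (List String)) (river_actions : Option (List String)) : Prop :=
  cleanPhase preflop_actions = true ∧
  (noFold preflop_actions = true → cleanPhase flop_actions = true) ∧
  (noFold preflop_actions = true ∧ noFold flop_actions = true → cleanPhase turn_actions = true) ∧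
  (noFold preflop_actions = true ∧ noFold flop_actions = true ∧ noFold turn_actions = true → cleanPhase river_actions = true)
instance (preflop_actions : Option (List String)) (flop_actions : Option (List String)) (turn_actions : Option (List String)) (river_actions : Option (List String)) : Decidable (Pre_check_fold preflop_actions flop_actions turn_actions river_actions) := by unfold Pre_check_fold; infer_instance

def pvWitness_check_fold : Option (List String) × Option (List String) × Option (List String) × Option (List String) :=
  (some ["call", "raise"], some ["check", "fold"], none, some ["f"])

def Spec_check_fold (preflop_actions : Option (List String)) (flop_actions : Option (List String)) (turn_actions : Option (List String)) (river_actions : Option (List String)) (out : Bool × Bool) : Prop := out = check_fold_alt preflop_actions flop_actions turn_actions river_actions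
instance (preflop_actions : Option (List String)) (flop_actions : Option (List String)) (turn_actions : Option (List String)) (river_actions : Option (List String)) (out : Bool × Bool) : Decidable (Spec_check_fold preflop_actions flop_actions turn_actions river_actions out) := by unfold Spec_check_fold; infer_instance

-- ===== CLAIM (what is proved, stated in full; the proofs are below) =====
def Claim_equal_check_fold : Prop := ∀ (preflop_actions : Option (List String)) (flop_actions : Option (List String)) (turn_actions : Option (List String)) (river_actions : Option (List String)), Dom_check_fold preflop_actions flop_actions turn_actions river_actions → Pre_check_fold preflop_actions flop_actions turn_actions river_actions → Spec_check_fold preflop_actions flop_actions turn_actions river_actions (check_fold preflop_actions flop_actions turn_actions river_actions)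

-- ===== LEMMAS AND PROOFS =====

-- A's per-phase scan from state (sb, bb) computes exactly B's two parity-filtered any-passes,
-- each OR-ed onto the incoming flag.
theorem foldl_stepA (l : List (Int × String)) (sb bb : Bool) :
    l.foldl stepA (sb, bb) =
      (sb || (l.filter (fun q => q.1 % 2 == 0)).any (fun q => PySem.Str.pyGet? q.2 0 == some 'f'),
       bb || (l.filter (fun q => q.1 % 2 == 1)).any (fun q => PySem.Str.pyGet? q.2 0 == some 'f')) := by
  induction l generalizing sb bb with
  | nil => simp
  | cons q rest ih =>
    rcases Int.emod_two_eq q.1 with h | h <;>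
      cases hf : (PySem.List.pyGet? q.2.toList 0 == some 'f') <;>
        simp [stepA, PySem.Str.pyGet?, h, hf, ih]

theorem foldl_stepA_phase (xs : List String) :
    (PySem.List.enumerate xs).foldl stepA (false, false) = phaseFolds xs := by
  simp [foldl_stepA, phaseFolds]

-- once a flag is set, A's remaining guarded phases leave the state unchanged
def stepPhase (st : Bool × Bool) (o : Option (List String)) : Bool × Bool :=
  match o with
  | none => st
  | some xs => if st.1 = false ∧ st.2 = false then (PySem.List.enumerate xs).foldl stepA st else st

theorem foldl_stepPhase_stuck (phs : List (Option (List String))) (st : Bool × Bool)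
    (h : st.1 || st.2 = true) : phs.foldl stepPhase st = st := by
  induction phs with
  | nil => rfl
  | cons o rest ih =>
    have : stepPhase st o = st := by
      cases o with
      | none => rfl
      | some xs =>
        simp only [stepPhase]
        rw [if_neg]
        rintro ⟨h1, h2⟩
        simp [h1, h2] at h
    simp [List.foldl, this, ih]

theorem foldl_stepPhase_eq_goPhases (phs : List (Option (List String))) :
    phs.foldl stepPhase (false, false) = goPhases phs := by
  induction phs with
  | nil => rfl
  | cons o rest ih =>
    cases o with
    | none => simpa [List.foldl, stepPhase] using ih
    | some xs =>
      have hstep : stepPhase (false, false) (some xs) = phaseFolds xs := by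
        simp [stepPhase, foldl_stepA_phase]
      rcases hp : phaseFolds xs with ⟨a, b⟩
      rw [hp] at hstep
      cases a <;> cases b
      · simp [List.foldl, hstep, goPhases, hp, ih]
      all_goals
        simp only [List.foldl, hstep, goPhases, hp]
        simp only [Bool.or_true, Bool.true_or, if_pos]
        exact foldl_stepPhase_stuck _ _ (by simp)

theorem check_fold_eq_foldl (p f t r : Option (List String)) :
    check_fold p f t r = [p, f, t, r].foldl stepPhase (false, false) := by
  cases p <;> simp [check_fold, stepPhase, List.foldl]

-- ===== VERDICT (by name: the statement is the Claim_ definition above) =====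
theorem check_fold_spec : Claim_equal_check_fold := by
  intro p f t r _ _
  unfold Spec_check_fold check_fold_alt
  rw [check_fold_eq_foldl, foldl_stepPhase_eq_goPhases]
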